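-- pv_equiv track=rewrite | github.com/lcfyi/advent-of-code | day16/part1/sol.py | calculate_phase
-- ===== SOURCE A (Python) =====
-- def pattern_gen(iter, pattern):
--     first = True
--     while True:
--         for n in pattern:
--             for _ in range(iter + 1):
--                 if first:
--                     first = False
--                     continue
--                 yield n
--
-- def calculate_phase(indata, pattern, iters):
--     output = indata
--     for _ in range(iters):
--         temp = []
--         for i in range(len(output)):
--             total = 0
--             for val, pat in zip(output, pattern_gen(i, pattern)):
--                 total += val * pat
--             temp.append(abs(total) % 10)
--         output = temp
--     return output
-- ===== SOURCE B (Python) =====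
-- def calculate_phase(indata, pattern, iters):
--     output = list(indata)
--     n = len(output)
--     L = len(pattern)
--     for _ in range(iters):
--         prefix = [0] * (n + 1)
--         s = 0
--         for j in range(n):
--             s += output[j]
--             prefix[j + 1] = s
--         temp = []
--         for i in range(n):
--             step = i + 1
--             total = pattern[0] * prefix[i]
--             k = 1
--             start = i
--             while start < n:
--                 end = start + step
--                 if end > n:
--                     end = n
--                 total += pattern[k % L] * (prefix[end] - prefix[start])
--                 k += 1
--                 start += step
--             temp.append(abs(total) % 10)
--         output = temp
--     return output
-- ===== Notes on version B (the rewrite author's own statement) =====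
-- stated objective: faster
-- what changed: Replaces the per-row element-by-element product with the generated pattern stream by a prefix-sum array plus per-row summation of constant-weight contiguous blocks, so each output row costs O(n/i) block operations instead of O(n).
import Mathlib
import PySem

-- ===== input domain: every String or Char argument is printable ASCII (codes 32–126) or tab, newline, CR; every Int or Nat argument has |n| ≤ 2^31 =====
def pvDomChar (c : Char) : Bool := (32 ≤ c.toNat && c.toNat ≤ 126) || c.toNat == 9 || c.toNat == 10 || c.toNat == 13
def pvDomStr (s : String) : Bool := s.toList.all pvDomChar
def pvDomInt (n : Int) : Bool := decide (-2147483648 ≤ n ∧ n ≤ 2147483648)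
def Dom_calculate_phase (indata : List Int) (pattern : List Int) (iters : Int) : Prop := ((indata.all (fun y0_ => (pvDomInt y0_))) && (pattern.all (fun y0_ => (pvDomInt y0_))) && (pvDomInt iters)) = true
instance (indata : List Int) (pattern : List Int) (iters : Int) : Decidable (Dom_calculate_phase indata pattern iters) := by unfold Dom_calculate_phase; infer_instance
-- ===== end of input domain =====

-- B replaces the per-row scan against the generated pattern stream by a prefix-sum array
-- summed over the constant-weight contiguous blocks of the pattern (asymptotically faster).

-- ===== PORT A =====
-- pattern_gen yields, cycling through 'pattern', each element (iter+1) times, with the very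
-- first element of the stream skipped; the port materialises the first m elements of that
-- stream ((m+2) pattern cycles are always enough since each cycle yields ≥ 1 element).
def pgTake (m : Nat) (iter : Nat) (pattern : List Int) : List Int :=
  List.take m (List.drop 1 (List.flatten (List.replicate (m + 2)
    (pattern.flatMap (fun p => List.replicate (iter + 1) p)))))

def calculate_phase (indata : List Int) (pattern : List Int) (iters : Int) : List Int :=
  (PySem.List.pyRange 0 iters 1).foldl (fun output _ =>
    (List.range output.length).map (fun i =>
      (Int.ofNat ((((output.zip (pgTake output.length i pattern)).foldl
        (fun (total : Int) (vp : Int × Int) => total + vp.1 * vp.2) 0).natAbs) % 10)))) indata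

-- ===== PORT B =====
-- running-sum prefix list: mkPrefix s xs = [s+x0, s+x0+x1, …]
def mkPrefix (s : Int) : List Int → List Int
  | [] => []
  | v :: rest => (s + v) :: mkPrefix (s + v) rest

-- the while-loop of Source B: add pattern[k % L] * (prefix[min(start+step,n)] - prefix[start])
def blockSum (pref : List Int) (pattern : List Int) (n i k start : Nat) (total : Int) : Int :=
  if start < n then
    blockSum pref pattern n i (k + 1) (start + i + 1)
      (total + pattern.getD (k % pattern.length) 0 *
        (pref.getD (min (start + i + 1) n) 0 - pref.getD start 0))
  else total
  termination_by n - start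

def calculate_phase_alt (indata : List Int) (pattern : List Int) (iters : Int) : List Int :=
  (PySem.List.pyRange 0 iters 1).foldl (fun output _ =>
    let n := output.length
    let pref := 0 :: mkPrefix 0 output
    (List.range n).map (fun i =>
      (Int.ofNat ((blockSum pref pattern n i 1 i
        (pattern.getD 0 0 * pref.getD i 0)).natAbs % 10)))) indata

-- ===== PRECONDITION & SPEC =====
-- Pre_ excludes empty pattern together with nonempty data and iters ≥ 1: there A's
-- pattern generator loops forever (A never returns), while B raises IndexError.
def Pre_calculate_phase (indata : List Int) (pattern : List Int) (iters : Int) : Prop :=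
  pattern ≠ [] ∨ iters ≤ 0 ∨ indata = []
instance (indata : List Int) (pattern : List Int) (iters : Int) : Decidable (Pre_calculate_phase indata pattern iters) := by unfold Pre_calculate_phase; infer_instance

def pvWitness_calculate_phase : List Int × List Int × Int := ([1, 2, 3, 4], [0, 1, 0, -1], 2)

def Spec_calculate_phase (indata : List Int) (pattern : List Int) (iters : Int) (out : List Int) : Prop := out = calculate_phase_alt indata pattern iters
instance (indata : List Int) (pattern : List Int) (iters : Int) (out : List Int) : Decidable (Spec_calculate_phase indata pattern iters out) := by unfold Spec_calculate_phase; infer_instance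

-- ===== CLAIM (what is proved, stated in full; the proofs are below) =====
def Claim_equal_calculate_phase : Prop := ∀ (indata : List Int) (pattern : List Int) (iters : Int), Dom_calculate_phase indata pattern iters → Pre_calculate_phase indata pattern iters → Spec_calculate_phase indata pattern iters (calculate_phase indata pattern iters)

-- ===== LEMMAS AND PROOFS =====

-- the pattern stream from block k on, b blocks long: each block repeats pattern[k'%L] (i+1) times
def streamN (pattern : List Int) (i : Nat) : Nat → Nat → List Int
  | 0, _ => []
  | b + 1, k => List.replicate (i + 1) (pattern.getD (k % pattern.length) 0) ++
      streamN pattern i b (k + 1)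

theorem streamN_shift (pattern : List Int) (i : Nat) :
    ∀ b k, streamN pattern i b (k + pattern.length) = streamN pattern i b k := by
  intro b
  induction b with
  | zero => intro k; rfl
  | succ b ih =>
    intro k
    simp only [streamN, Nat.add_mod_right]
    rw [show k + pattern.length + 1 = (k + 1) + pattern.length by omega, ih]

theorem streamN_append (pattern : List Int) (i : Nat) :
    ∀ a b k, streamN pattern i (a + b) k = streamN pattern i a k ++ streamN pattern i b (k + a) := by
  intro a
  induction a with
  | zero => intro b k; simp [streamN]
  | succ a ih =>
    intro b k
    rw [show a + 1 + b = (a + b) + 1 by omega]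
    simp only [streamN, ih, List.append_assoc]
    rw [show k + 1 + a = k + (a + 1) by omega]

theorem map_getD_range (xs : List Int) :
    (List.range xs.length).map (fun t => xs.getD t 0) = xs := by
  induction xs with
  | nil => rfl
  | cons x rest ih =>
    simp only [List.length_cons, List.range_succ_eq_map, List.map_cons, List.map_map]
    simpa using ih

theorem streamN_block (pattern : List Int) (i : Nat) :
    streamN pattern i pattern.length 0 = pattern.flatMap (fun p => List.replicate (i + 1) p) := by
  have aux : ∀ b k, streamN pattern i b k =
      ((List.range b).map (fun t => List.replicate (i + 1)
        (pattern.getD ((k + t) % pattern.length) 0))).flatten := by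
    intro b
    induction b with
    | zero => intro k; rfl
    | succ b ih =>
      intro k
      simp only [streamN, List.range_succ_eq_map, List.map_cons, List.flatten_cons,
        List.map_map, Nat.add_zero]
      rw [ih (k + 1)]
      congr 1
      apply congrArg List.flatten
      apply List.map_congr_left
      intro t _
      simp only [Function.comp_apply]
      rw [show k + (t + 1) = (k + 1) + t by omega]
  rw [aux]
  have h1 : (List.range pattern.length).map (fun t => List.replicate (i + 1)
      (pattern.getD ((0 + t) % pattern.length) 0)) =
      (List.range pattern.length).map (fun t => List.replicate (i + 1) (pattern.getD t 0)) := by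
    apply List.map_congr_left
    intro t ht
    rw [Nat.zero_add, Nat.mod_eq_of_lt (List.mem_range.mp ht)]
  rw [h1]
  have h2 : (List.range pattern.length).map (fun t => List.replicate (i + 1) (pattern.getD t 0)) =
      pattern.map (fun p => List.replicate (i + 1) p) := by
    conv_rhs => rw [← map_getD_range pattern]
    rw [List.map_map]
    rfl
  rw [h2, List.flatMap_def]

theorem streamN_cycles (pattern : List Int) (i : Nat) :
    ∀ m, streamN pattern i (m * pattern.length) 0 =
      List.flatten (List.replicate m (pattern.flatMap (fun p => List.replicate (i + 1) p))) := by
  intro m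
  induction m with
  | zero => simp [streamN]
  | succ m ih =>
    rw [show (m + 1) * pattern.length = pattern.length + m * pattern.length by ring]
    rw [streamN_append, streamN_block]
    rw [show (0 + pattern.length) = 0 + pattern.length from rfl]
    have := streamN_shift pattern i (m * pattern.length) 0
    simp only [Nat.zero_add] at this ⊢
    rw [this, ih, List.replicate_succ, List.flatten_cons]

-- foldl of the zip accumulates the dot product
theorem foldl_zip_dot (xs : List Int) :
    ∀ (ys : List Int) (a : Int),
      (xs.zip ys).foldl (fun (total : Int) (vp : Int × Int) => total + vp.1 * vp.2) a =
        a + (List.zipWith (fun x y => x * y) xs ys).sum := by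
  induction xs with
  | nil => intro ys a; simp
  | cons x xs ih =>
    intro ys a
    cases ys with
    | nil => simp
    | cons y ys =>
      simp only [List.zip_cons_cons, List.foldl_cons, List.zipWith_cons_cons, List.sum_cons]
      rw [ih]
      ring

theorem zipWith_take_length (f : Int → Int → Int) (xs : List Int) :
    ∀ ys, List.zipWith f xs (List.take xs.length ys) = List.zipWith f xs ys := by
  induction xs with
  | nil => intro ys; simp
  | cons x xs ih =>
    intro ys
    cases ys with
    | nil => simp
    | cons y ys => simp [ih]

theorem dot_replicate_append (p : Int) :
    ∀ (w : Nat) (xs ys : List Int),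
      (List.zipWith (fun x y => x * y) xs (List.replicate w p ++ ys)).sum =
        p * (xs.take w).sum + (List.zipWith (fun x y => x * y) (xs.drop w) ys).sum := by
  intro w
  induction w with
  | zero => intro xs ys; simp
  | succ w ih =>
    intro xs ys
    cases xs with
    | nil => simp
    | cons x xs =>
      simp only [List.replicate_succ, List.cons_append, List.zipWith_cons_cons, List.sum_cons,
        List.take_succ_cons, List.drop_succ_cons]
      rw [ih]
      ring

theorem getD_prefix (output : List Int) :
    ∀ (j : Nat) (s : Int), j ≤ output.length →
      (s :: mkPrefix s output).getD j 0 = s + (output.take j).sum := by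
  induction output with
  | nil =>
    intro j s hj
    have hj0 : j = 0 := by simpa using hj
    subst hj0
    simp
  | cons v rest ih =>
    intro j s hj
    cases j with
    | zero => simp
    | succ j =>
      simp only [List.length_cons] at hj
      simp only [mkPrefix, List.getD_cons_succ, List.take_succ_cons, List.sum_cons]
      rw [ih j (s + v) (by omega)]
      ring

theorem take_min_sum (output : List Int) (e : Nat) :
    (output.take (min e output.length)).sum = (output.take e).sum := by
  rcases Nat.le_total e output.length with h | h
  · rw [min_eq_left h]
  · rw [min_eq_right h, List.take_of_length_le h, List.take_of_length_le (le_refl _)]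

theorem blockSum_eq (output pattern : List Int) (i : Nat) :
    ∀ (b start k : Nat) (total : Int),
      b * (i + 1) ≥ output.length - start →
      blockSum (0 :: mkPrefix 0 output) pattern output.length i k start total =
        total + (List.zipWith (fun x y => x * y) (output.drop start) (streamN pattern i b k)).sum := by
  intro b
  induction b with
  | zero =>
    intro start k total hcov
    have hstart : output.length ≤ start := by omega
    rw [blockSum]
    rw [if_neg (by omega)]
    simp [streamN, List.drop_of_length_le hstart]
  | succ b ih =>
    intro start k total hcov
    by_cases hlt : start < output.length
    · rw [blockSum, if_pos hlt]
      rw [ih (start + i + 1) (k + 1) _ (by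
        have : (b + 1) * (i + 1) = b * (i + 1) + (i + 1) := by ring
        omega)]
      have hs : start ≤ output.length := le_of_lt hlt
      have h1 : (0 :: mkPrefix 0 output).getD (min (start + i + 1) output.length) 0 =
          (output.take (start + i + 1)).sum := by
        rw [getD_prefix output _ 0 (by omega), take_min_sum]
        ring
      have h2 : (0 :: mkPrefix 0 output).getD start 0 = (output.take start).sum := by
        rw [getD_prefix output _ 0 hs]; ring
      rw [h1, h2]
      have h3 : (output.take (start + i + 1)).sum =
          (output.take start).sum + ((output.drop start).take (i + 1)).sum := by
        rw [show start + i + 1 = start + (i + 1) by omega, List.take_add, List.sum_append]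
      simp only [streamN]
      rw [dot_replicate_append, List.drop_drop]
      rw [show start + (i + 1) = start + i + 1 by omega]
      rw [h3]
      ring
    · rw [blockSum, if_neg hlt]
      simp [List.drop_of_length_le (by omega : output.length ≤ start)]

-- per-row equality of the two ports' totals, for nonempty pattern
theorem row_eq (output pattern : List Int) (i : Nat) (hpat : pattern ≠ [])
    (hi : i < output.length) :
    (output.zip (pgTake output.length i pattern)).foldl (fun (total : Int) (vp : Int × Int) => total + vp.1 * vp.2) 0 =
      blockSum (0 :: mkPrefix 0 output) pattern output.length i 1 i
        (pattern.getD 0 0 * (0 :: mkPrefix 0 output).getD i 0) := by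
  have hL : 0 < pattern.length := List.length_pos_iff.mpr hpat
  set n := output.length with hn
  set L := pattern.length with hLdef
  -- B side
  set Bn := (n + 2) * L - 1 with hBn
  have hcov : Bn * (i + 1) ≥ n - i := by
    have h1 : Bn ≥ n + 1 := by
      have : (n + 2) * L ≥ (n + 2) * 1 := Nat.mul_le_mul_left _ hL
      omega
    have : Bn * (i + 1) ≥ Bn * 1 := Nat.mul_le_mul_left _ (by omega)
    omega
  rw [blockSum_eq output pattern i Bn i 1 _ hcov]
  rw [getD_prefix output i 0 (le_of_lt hi)]
  -- A side
  rw [foldl_zip_dot]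
  unfold pgTake
  have hflat : List.flatten (List.replicate (n + 2)
      (pattern.flatMap (fun p => List.replicate (i + 1) p))) = streamN pattern i ((n + 2) * L) 0 :=
    (streamN_cycles pattern i (n + 2)).symm
  rw [hflat]
  have hsplit : streamN pattern i ((n + 2) * L) 0 =
      List.replicate (i + 1) (pattern.getD 0 0) ++ streamN pattern i Bn 1 := by
    have hpos : 1 ≤ (n + 2) * L := Nat.mul_pos (by omega) hL
    rw [show (n + 2) * L = 1 + Bn by omega]
    rw [streamN_append]
    simp [streamN]
  rw [hsplit]
  rw [show List.replicate (i + 1) (pattern.getD 0 0) = pattern.getD 0 0 ::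
    List.replicate i (pattern.getD 0 0) from rfl]
  rw [List.cons_append, List.drop_succ_cons, List.drop_zero]
  rw [hn, zipWith_take_length]
  rw [dot_replicate_append]
  ring

-- one phase step of each port coincides (nonempty pattern)
theorem step_eq (pattern : List Int) (hpat : pattern ≠ []) (output : List Int) :
    (List.range output.length).map (fun i =>
      (Int.ofNat ((((output.zip (pgTake output.length i pattern)).foldl
        (fun (total : Int) (vp : Int × Int) => total + vp.1 * vp.2) 0).natAbs) % 10))) =
    (List.range output.length).map (fun i =>
      (Int.ofNat ((blockSum (0 :: mkPrefix 0 output) pattern output.length i 1 i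
        (pattern.getD 0 0 * (0 :: mkPrefix 0 output).getD i 0)).natAbs % 10))) := by
  apply List.map_congr_left
  intro i hi
  rw [row_eq output pattern i hpat (List.mem_range.mp hi)]

theorem foldl_nil_invariant {α : Type} (f : List Int → α → List Int)
    (hf : ∀ x, f [] x = []) : ∀ (l : List α), l.foldl f [] = [] := by
  intro l
  induction l with
  | nil => rfl
  | cons x l ih => simp [hf, ih]

-- ===== VERDICT (by name: the statement is the Claim_ definition above) =====
theorem calculate_phase_spec : Claim_equal_calculate_phase := by
  intro indata pattern iters _ hpre
  unfold Spec_calculate_phase calculate_phase calculate_phase_alt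
  by_cases hpat : pattern = []
  · subst hpat
    rcases hpre with h | h | h
    · exact absurd rfl h
    · rw [PySem.List.pyRange_one_eq_nil (by omega)]
      rfl
    · subst h
      rw [foldl_nil_invariant _ (by intro x; rfl), foldl_nil_invariant _ (by intro x; rfl)]
  · have hsteps : (fun (output : List Int) (_ : Int) =>
        (List.range output.length).map (fun i =>
          (Int.ofNat ((((output.zip (pgTake output.length i pattern)).foldl
            (fun (total : Int) (vp : Int × Int) => total + vp.1 * vp.2) 0).natAbs) % 10)))) =
        (fun (output : List Int) (_ : Int) =>
          let n := output.length
          let pref := 0 :: mkPrefix 0 output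
          (List.range n).map (fun i =>
            (Int.ofNat ((blockSum pref pattern n i 1 i
              (pattern.getD 0 0 * pref.getD i 0)).natAbs % 10)))) := by
      funext output _
      exact step_eq pattern hpat output
    rw [hsteps]
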